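-- pv_equiv track=rewrite | github.com/Intellivisionn/ElectronicNose-ModelTraining | main.py | create_time_window_features
-- ===== SOURCE A (Python) =====
-- def create_time_window_features(data, window_size):
--     result = []
--     for i in range(window_size - 1, len(data)):
--         subres = []
--         for datapoint in data[i - window_size + 1:i + 1]:
--             subres.extend(datapoint)
--         result.append(subres)
--
--     return result
-- ===== SOURCE B (Python) =====
-- def create_time_window_features(data, window_size):
--     if window_size > len(data):
--         return []
--     windows = zip(*(data[k:] for k in range(window_size)))
--     return [[v for dp in w for v in dp] for w in windows]
-- ===== Notes on version B (the rewrite author's own statement) =====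
-- stated objective: idiomatic
-- what changed: B builds the windows by zipping the window_size shifted copies of data (zip(*(data[k:] for k in range(window_size)))) and flattening each resulting tuple, instead of A's indexed loop that re-slices and re-extends each window.
-- intended difference: For window_size <= 0 A returns len(data)-window_size+1 junk rows (empty or negative-slice fragments, e.g. [[],[],[]] on ([[1,2],[3]],0)) that are artefacts of its range/slice arithmetic, while B returns [], the intended 'no valid windows' answer. — e.g. on create_time_window_features([[1, 2], [3]], 0): A returns [[], [], []], B returns []
import Mathlib
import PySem

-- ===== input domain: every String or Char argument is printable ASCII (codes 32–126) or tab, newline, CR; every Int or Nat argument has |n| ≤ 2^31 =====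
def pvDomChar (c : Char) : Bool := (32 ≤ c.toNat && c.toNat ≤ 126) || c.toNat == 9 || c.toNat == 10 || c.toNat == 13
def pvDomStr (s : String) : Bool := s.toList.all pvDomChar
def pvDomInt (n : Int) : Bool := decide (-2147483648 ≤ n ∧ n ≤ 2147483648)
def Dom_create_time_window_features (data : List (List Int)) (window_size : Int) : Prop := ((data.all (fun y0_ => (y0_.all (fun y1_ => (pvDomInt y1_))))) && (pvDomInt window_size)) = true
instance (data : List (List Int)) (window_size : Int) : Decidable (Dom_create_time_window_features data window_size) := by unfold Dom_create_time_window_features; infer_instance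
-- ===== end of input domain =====

-- B builds each window row by zipping the window_size shifted copies of data and
-- flattening, instead of A's indexed re-slice-and-extend loop (objective: idiomatic).

-- ===== PORT A =====
def create_time_window_features (data : List (List Int)) (window_size : Int) : List (List Int) :=
  (PySem.List.pyRange (window_size - 1) (data.length : Int) 1).foldl
    (fun result i =>
      result ++ [(PySem.List.slice data (some (i - window_size + 1)) (some (i + 1))).foldl
          (fun subres datapoint => subres ++ datapoint) []])
    []

-- ===== PORT B =====
-- zip(*iters): the number of rows Python's zip yields = length of the shortest iterable (0 for zip())
def pyZipCount (ls : List (List (List Int))) : Nat :=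
  match ls with
  | [] => 0
  | l :: rest => rest.foldl (fun m t => min m t.length) l.length

-- zip(*iters) as the list of its rows; every j < pyZipCount ls is in range, so getD's default is never read
def pyZipN (ls : List (List (List Int))) : List (List (List Int)) :=
  (List.range (pyZipCount ls)).map (fun j => ls.map (fun t => t.getD j []))

def create_time_window_features_alt (data : List (List Int)) (window_size : Int) : List (List Int) :=
  -- if window_size > len(data): return []
  if (data.length : Int) < window_size then []
  else
  -- windows = zip(*(data[k:] for k in range(window_size))); [[v for dp in w for v in dp] for w in windows]
  (pyZipN ((PySem.List.pyRange 0 window_size 1).map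
      (fun k => PySem.List.slice data (some k) none))).map (fun w => w.flatten)

-- ===== PRECONDITION & SPEC =====
-- For window_size <= 0 A returns len(data)-window_size+1 junk rows (empty or negative-slice
-- fragments, e.g. [[],[],[]] on ([[1,2],[3]],0)) that are artefacts of its range/slice
-- arithmetic, while B returns [], the intended 'no valid windows' answer.
def D_create_time_window_features (data : List (List Int)) (window_size : Int) : Prop :=
  window_size ≤ 0
instance (data : List (List Int)) (window_size : Int) : Decidable (D_create_time_window_features data window_size) := by unfold D_create_time_window_features; infer_instance

def Spec_create_time_window_features (data : List (List Int)) (window_size : Int) (out : List (List Int)) : Prop := ¬ D_create_time_window_features data window_size → out = create_time_window_features_alt data window_size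
instance (data : List (List Int)) (window_size : Int) (out : List (List Int)) : Decidable (Spec_create_time_window_features data window_size out) := by unfold Spec_create_time_window_features; infer_instance

def pvDiffWitness_create_time_window_features : List (List Int) × Int := ([[1, 2], [3]], 0)
def pvDiffWitnessOut_create_time_window_features : (List (List Int)) × (List (List Int)) :=
  ([[], [], []], [])

-- ===== CLAIM (what is proved, stated in full; the proofs are below) =====
def Claim_unchanged_create_time_window_features : Prop := ∀ (data : List (List Int)) (window_size : Int), Dom_create_time_window_features data window_size → Spec_create_time_window_features data window_size (create_time_window_features data window_size)
def Claim_changed_create_time_window_features : Prop := Dom_create_time_window_features (pvDiffWitness_create_time_window_features.1) (pvDiffWitness_create_time_window_features.2) ∧ D_create_time_window_features (pvDiffWitness_create_time_window_features.1) (pvDiffWitness_create_time_window_features.2) ∧ create_time_window_features (pvDiffWitness_create_time_window_features.1) (pvDiffWitness_create_time_window_features.2) = pvDiffWitnessOut_create_time_window_features.1 ∧ create_time_window_features_alt (pvDiffWitness_create_time_window_features.1) (pvDiffWitness_create_time_window_features.2) = pvDiffWitnessOut_create_time_window_features.2 ∧ pvDiffWitnessOut_create_time_window_features.1 ≠ 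pvDiffWitnessOut_create_time_window_features.2
def Claim_exact_create_time_window_features : Prop := ∀ (data : List (List Int)) (window_size : Int), Dom_create_time_window_features data window_size → D_create_time_window_features data window_size → create_time_window_features data window_size ≠ create_time_window_features_alt data window_size

-- ===== LEMMAS AND PROOFS =====

-- range(a, b) is empty when b ≤ a
lemma pyRange_nil {a b : Int} (h : b ≤ a) : PySem.List.pyRange a b 1 = [] := by
  rw [List.eq_nil_iff_forall_not_mem]
  intro x hx
  rw [PySem.List.mem_pyRange_one] at hx
  omega

-- range(s, n) over the naturals, as a mapped List.range
lemma pyRange_nat (s n : Nat) :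
    PySem.List.pyRange (s : Int) (n : Int) 1
      = (List.range (n - s)).map (fun k => ((s + k : Nat) : Int)) := by
  induction n with
  | zero =>
    rw [pyRange_nil (by omega)]
    simp
  | succ n ih =>
    by_cases h : n < s
    · rw [pyRange_nil (by omega)]
      have : n + 1 - s = 0 := by omega
      simp [this]
    · rw [not_lt] at h
      have hcast : ((n : Int) + 1) = ((n + 1 : Nat) : Int) := by push_cast; ring
      rw [← hcast, PySem.List.pyRange_one_succ_right (by exact_mod_cast h), ih]
      have hm : n + 1 - s = (n - s) + 1 := by omega
      rw [hm, List.range_succ, List.map_append]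
      congr 1
      simp only [List.map_cons, List.map_nil]
      congr 1
      omega

-- the head equation of pyZipCount
lemma pyZipCount_cons (l : List (List Int)) (rest : List (List (List Int))) :
    pyZipCount (l :: rest) = rest.foldl (fun m t => min m t.length) l.length := rfl

-- the running min of n-(k+1) over k < s is n-s
lemma minfold (s n : Nat) :
    (List.range s).foldl (fun m k => min m (n - (k + 1))) n = n - s := by
  induction s with
  | zero => simp
  | succ s ih =>
    rw [List.range_succ, List.foldl_append, ih]
    simp only [List.foldl_cons, List.foldl_nil]
    omega

-- A's value for a positive window size, in closed form
lemma A_closed (data : List (List Int)) (s : Nat) :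
    create_time_window_features data ((s : Int) + 1)
      = (List.range (data.length - s)).map
          (fun j => ((data.drop j).take (s + 1)).flatten) := by
  unfold create_time_window_features
  rw [PySem.List.foldl_append_singleton_eq_map
        (f := fun i => (PySem.List.slice data (some (i - ((s : Int) + 1) + 1)) (some (i + 1))).foldl
          (fun subres datapoint => subres ++ datapoint) [])]
  have h1 : (s : Int) + 1 - 1 = (s : Int) := by ring
  rw [List.nil_append, h1, pyRange_nat s data.length, List.map_map]
  apply List.map_congr_left
  intro k _
  simp only [Function.comp_apply]
  rw [PySem.List.foldl_append_eq_flatten, List.nil_append]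
  have h2 : ((s + k : Nat) : Int) - ((s : Int) + 1) + 1 = ((k : Nat) : Int) := by push_cast; ring
  have h3 : ((s + k : Nat) : Int) + 1 = ((k : Nat) : Int) + ((s + 1 : Nat) : Int) := by push_cast; ring
  rw [h2, h3, PySem.List.slice_natCast_add]

-- B's value for a positive window size, in the same closed form
lemma B_closed (data : List (List Int)) (s : Nat) :
    create_time_window_features_alt data ((s : Int) + 1)
      = (List.range (data.length - s)).map
          (fun j => ((data.drop j).take (s + 1)).flatten) := by
  unfold create_time_window_features_alt
  by_cases hbig : (data.length : Int) < (s : Int) + 1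
  · rw [if_pos hbig]
    have h0 : data.length - s = 0 := by omega
    rw [h0]
    simp
  rw [if_neg hbig]
  have hcast : ((s : Int) + 1) = ((s + 1 : Nat) : Int) := by push_cast; ring
  rw [hcast, PySem.List.pyRange_zero_natCast, List.map_map]
  have hshifts : (List.range (s + 1)).map
      ((fun k => PySem.List.slice data (some k) none) ∘ (fun k : Nat => (k : Int)))
      = (List.range (s + 1)).map (fun k => data.drop k) := by
    apply List.map_congr_left
    intro k _
    simp only [Function.comp_apply]
    exact PySem.List.slice_from_natCast data k
  rw [hshifts]
  have hcount : pyZipCount ((List.range (s + 1)).map (fun k => data.drop k))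
      = data.length - s := by
    rw [List.range_succ_eq_map, List.map_cons, List.map_map, pyZipCount_cons, List.foldl_map]
    simp only [Function.comp_apply, List.length_drop, List.drop_zero, Nat.succ_eq_add_one]
    exact minfold s data.length
  unfold pyZipN
  rw [hcount, List.map_map]
  apply List.map_congr_left
  intro j hj
  rw [List.mem_range] at hj
  simp only [Function.comp_apply, List.map_map]
  congr 1
  -- the j-th zip row is exactly data[j : j + s + 1]
  apply List.ext_getElem
  · simp only [List.length_map, List.length_range, List.length_take, List.length_drop]
    omega
  · intro k hk hk'
    simp only [List.length_map, List.length_range] at hk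
    have hjk : j + k < data.length := by omega
    simp only [List.getElem_map, List.getElem_range, Function.comp_apply,
      List.getElem_take, List.getElem_drop]
    rw [List.getD_eq_getElem?_getD, List.getElem?_drop]
    rw [List.getElem?_eq_getElem (by omega : k + j < data.length)]
    simp only [Option.getD_some]
    congr 1
    omega

-- B is [] for a non-positive window size
lemma B_nonpos (data : List (List Int)) (window_size : Int) (h : window_size ≤ 0) :
    create_time_window_features_alt data window_size = [] := by
  unfold create_time_window_features_alt
  rw [if_neg (by omega : ¬ ((data.length : Int) < window_size)), pyRange_nil h]
  simp [pyZipN, pyZipCount]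

-- ===== VERDICT (by name: the statement is the Claim_ definition above) =====
theorem create_time_window_features_spec : Claim_unchanged_create_time_window_features := by
  intro data window_size _ hnd
  unfold D_create_time_window_features at hnd
  obtain ⟨s, hs⟩ : ∃ s : Nat, window_size = (s : Int) + 1 :=
    ⟨(window_size - 1).toNat, by omega⟩
  rw [hs, A_closed, B_closed]

theorem create_time_window_features_changed : Claim_changed_create_time_window_features := by
  unfold Claim_changed_create_time_window_features; decide

theorem create_time_window_features_tight : Claim_exact_create_time_window_features := by
  intro data window_size _ hd
  unfold D_create_time_window_features at hd
  rw [B_nonpos data window_size hd]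
  unfold create_time_window_features
  rw [PySem.List.foldl_append_singleton_eq_map
        (f := fun i => (PySem.List.slice data (some (i - window_size + 1)) (some (i + 1))).foldl
          (fun subres datapoint => subres ++ datapoint) []),
      List.nil_append]
  intro hcontra
  rw [List.map_eq_nil_iff, List.eq_nil_iff_forall_not_mem] at hcontra
  exact hcontra (window_size - 1) (by rw [PySem.List.mem_pyRange_one]; constructor <;> [rfl; omega])
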